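-- pv_equiv track=rewrite | github.com/plonski-fvt/advent-of-code-2023 | day14/day14b.py | roll_rocks_west
-- ===== SOURCE A (Python) =====
-- from typing import List
--
-- def roll_rocks_west(rock_rows: List[List[str]]):
--     rolled_a_rock = False
--     for row in rock_rows:
--         for i in range(0,len(row)-1):
--             if row[i] == "." and row[i+1] == "O":
--                 row[i] = "O"
--                 row[i+1] = "."
--                 rolled_a_rock = True
--     return rolled_a_rock
-- ===== SOURCE B (Python) =====
-- def roll_rocks_west(rock_rows):
--     rolled_a_rock = False
--     for row in rock_rows:
--         n = len(row)
--         i = 0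
--         while i < n:
--             if row[i] == "O":
--                 j = i
--                 while j + 1 < n and row[j + 1] == "O":
--                     j += 1
--                 if i > 0 and row[i - 1] == ".":
--                     row[i - 1] = "O"
--                     row[j] = "."
--                     rolled_a_rock = True
--                 i = j + 1
--             else:
--                 i += 1
--     return rolled_a_rock
-- ===== Notes on version B (the rewrite author's own statement) =====
-- stated objective: alternative
-- what changed: B replaces A's per-cell '.O'->'O.' swap cascade (a for-loop over every adjacent pair) with a run-based scan: it finds each maximal run of consecutive 'O's and block-shifts the whole run one cell west when the cell to its left is '.', skipping past the run in one jump.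
import Mathlib
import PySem

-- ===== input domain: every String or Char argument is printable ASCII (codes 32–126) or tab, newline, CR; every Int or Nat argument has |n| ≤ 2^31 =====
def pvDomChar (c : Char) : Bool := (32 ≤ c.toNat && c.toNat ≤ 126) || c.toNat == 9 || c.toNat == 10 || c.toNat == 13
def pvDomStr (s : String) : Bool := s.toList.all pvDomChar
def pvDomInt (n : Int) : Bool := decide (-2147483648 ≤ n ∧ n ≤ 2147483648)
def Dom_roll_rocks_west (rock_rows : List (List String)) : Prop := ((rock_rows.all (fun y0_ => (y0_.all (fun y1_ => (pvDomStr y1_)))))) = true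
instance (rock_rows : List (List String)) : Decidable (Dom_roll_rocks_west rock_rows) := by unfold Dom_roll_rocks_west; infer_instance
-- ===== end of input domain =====

-- B replaces A's per-cell '.O'->'O.' swap cascade with a run-based scan that block-shifts every
-- maximal run of 'O's one cell west when a '.' sits to its left; equivalence is proved for the
-- RETURN value (both Pythons also perform the identical in-place row mutation).

-- ===== PORT A =====
-- one step of A's inner loop: if row[i]=="." and row[i+1]=="O" then swap and set the flag
def pvStepA (st : List String × Bool) (i : Int) : List String × Bool :=
  if PySem.List.pyGetD st.1 i "" = "." ∧ PySem.List.pyGetD st.1 (i + 1) "" = "O" then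
    (PySem.List.pySetD (PySem.List.pySetD st.1 i "O") (i + 1) ".", true)
  else st

-- A's inner loop: for i in range(0, len(row)-1)
def pvRowA (rolled : Bool) (row : List String) : Bool :=
  ((PySem.List.pyRange 0 ((row.length : Int) - 1) 1).foldl pvStepA (row, rolled)).2

def roll_rocks_west (rock_rows : List (List String)) : Bool :=
  rock_rows.foldl pvRowA false

-- ===== PORT B =====
-- B's inner while loop: extend j to the end of the maximal run of "O"s starting at j
def pvRunEnd (row : List String) (j : Nat) : Nat :=
  if h : j + 1 < row.length ∧ row.getD (j + 1) "" = "O" then pvRunEnd row (j + 1) else j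
termination_by row.length - j
decreasing_by omega

-- needed for pvScanRow's termination; cited by name in its decreasing_by
theorem pvRunEnd_ge (row : List String) (j : Nat) : j ≤ pvRunEnd row j := by
  rw [pvRunEnd]
  split
  · exact Nat.le_trans (Nat.le_succ j) (pvRunEnd_ge row (j + 1))
  · exact Nat.le_refl j
termination_by row.length - j
decreasing_by omega

-- B's outer while loop over one row
def pvScanRow (row : List String) (rolled : Bool) (i : Nat) : List String × Bool :=
  if hlt : i < row.length then
    if row.getD i "" = "O" then
      let j := pvRunEnd row i
      if 0 < i ∧ row.getD (i - 1) "" = "." then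
        pvScanRow ((row.set (i - 1) "O").set j ".") true (j + 1)
      else pvScanRow row rolled (j + 1)
    else pvScanRow row rolled (i + 1)
  else (row, rolled)
termination_by row.length - i
decreasing_by
  · have := pvRunEnd_ge row i; simp only [List.length_set]; omega
  · have := pvRunEnd_ge row i; omega
  · omega

def roll_rocks_west_alt (rock_rows : List (List String)) : Bool :=
  rock_rows.foldl (fun rolled row => (pvScanRow row rolled 0).2) false

-- ===== PRECONDITION & SPEC =====
def Spec_roll_rocks_west (rock_rows : List (List String)) (out : Bool) : Prop := out = roll_rocks_west_alt rock_rows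
instance (rock_rows : List (List String)) (out : Bool) : Decidable (Spec_roll_rocks_west rock_rows out) := by unfold Spec_roll_rocks_west; infer_instance

-- ===== CLAIM (what is proved, stated in full; the proofs are below) =====
def Claim_equal_roll_rocks_west : Prop := ∀ (rock_rows : List (List String)), Dom_roll_rocks_west rock_rows → Spec_roll_rocks_west rock_rows (roll_rocks_west rock_rows)

-- ===== LEMMAS AND PROOFS =====

-- "row has an adjacent ('.', 'O') pair" — the common characterisation of both flags
def PairAt (r : List String) (t : Nat) : Prop :=
  r.getD t "" = "." ∧ r.getD (t + 1) "" = "O"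

def HP (r : List String) : Prop := ∃ t, t + 1 < r.length ∧ PairAt r t

theorem getD_set_ne {xs : List String} {a m : Nat} (h : a ≠ m) (v d : String) :
    (xs.set a v).getD m d = xs.getD m d := by
  simp [List.getD, List.getElem?_set_ne h]

-- A's inner-loop step with a Nat index (proof-side view of pvStepA)
def pvStepAN (st : List String × Bool) (t : Nat) : List String × Bool := pvStepA st (t : Int)

theorem getD_set_self {xs : List String} {a : Nat} (h : a < xs.length) (v d : String) :
    (xs.set a v).getD a d = v := by
  simp [List.getD, h]

theorem pvRunEnd_lt (row : List String) (j : Nat) (hj : j < row.length) :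
    pvRunEnd row j < row.length := by
  rw [pvRunEnd]
  split
  next h => exact pvRunEnd_lt row (j + 1) h.1
  next => exact hj
termination_by row.length - j
decreasing_by omega

theorem pvRunEnd_O (row : List String) (j : Nat) (h : row.getD j "" = "O") :
    ∀ m, j ≤ m → m ≤ pvRunEnd row j → row.getD m "" = "O" := by
  rw [pvRunEnd]
  split
  next hc =>
    intro m h1 h2
    rcases Nat.eq_or_lt_of_le h1 with rfl | h1'
    · exact h
    · exact pvRunEnd_O row (j + 1) hc.2 m h1' h2
  next =>
    intro m h1 h2
    have : m = j := Nat.le_antisymm h2 h1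
    simpa [this] using h
termination_by row.length - j
decreasing_by omega

theorem pvRunEnd_step (row : List String) (j : Nat)
    (h : j + 1 < row.length ∧ row.getD (j + 1) "" = "O") :
    pvRunEnd row j = pvRunEnd row (j + 1) := by
  conv_lhs => rw [pvRunEnd]
  rw [dif_pos h]

theorem pvRunEnd_stop (row : List String) (j : Nat)
    (h : ¬(j + 1 < row.length ∧ row.getD (j + 1) "" = "O")) :
    pvRunEnd row j = j := by
  conv_lhs => rw [pvRunEnd]
  rw [dif_neg h]

theorem pvRunEnd_next (row : List String) (j : Nat)
    (h2 : pvRunEnd row j + 1 < row.length) : row.getD (pvRunEnd row j + 1) "" ≠ "O" := by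
  by_cases hc : j + 1 < row.length ∧ row.getD (j + 1) "" = "O"
  · rw [pvRunEnd_step row j hc] at h2 ⊢
    exact pvRunEnd_next row (j + 1) h2
  · rw [pvRunEnd_stop row j hc] at h2 ⊢
    intro hO
    exact hc ⟨h2, hO⟩
termination_by row.length - j
decreasing_by omega

-- main B-side invariant
theorem scanB_inv (r : List String) (f0 : Bool) (cur : List String) (f : Bool) (i : Nat)
    (H0 : i ≤ r.length)
    (H1 : cur.length = r.length)
    (H2 : ∀ m, i ≤ m → cur.getD m "" = r.getD m "")
    (H3 : f = true ↔ (f0 = true ∨ ∃ t, t + 1 < i ∧ PairAt r t))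
    (H4 : 0 < i → cur.getD (i - 1) "" = "." → (r.getD (i - 1) "" = "." ∨ f = true))
    (H5 : 0 < i → r.getD (i - 1) "" = "." → cur.getD (i - 1) "" = ".") :
    ((pvScanRow cur f i).2 = true ↔ (f0 = true ∨ ∃ t, t + 1 < r.length ∧ PairAt r t)) := by
  rw [pvScanRow]
  split
  case isFalse hlt =>
    have hi : i = r.length := by omega
    simp only [H3, hi]
  case isTrue hlt =>
    have hin : i < r.length := by omega
    by_cases hO : cur.getD i "" = "O"
    · simp only [hO, if_true]
      set j := pvRunEnd cur i with hj
      have hij : i ≤ j := pvRunEnd_ge cur i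
      have hjlt : j < r.length := by have := pvRunEnd_lt cur i hlt; omega
      have hrun : ∀ m, i ≤ m → m ≤ j → r.getD m "" = "O" := by
        intro m hm1 hm2
        rw [← H2 m hm1]; exact pvRunEnd_O cur i hO m hm1 hm2
      have hnext : j + 1 < r.length → r.getD (j + 1) "" ≠ "O" := by
        intro hlt2
        rw [← H2 (j + 1) (by omega)]
        exact pvRunEnd_next cur i (by omega)
      by_cases hsh : 0 < i ∧ cur.getD (i - 1) "" = "."
      · rw [if_pos hsh]
        apply scanB_inv r f0 _ true (j + 1)
        · omega
        · simp [H1]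
        · intro m hm
          rw [getD_set_ne (by omega), getD_set_ne (by omega)]
          exact H2 m (by omega)
        · simp only [true_iff]
          rcases H4 hsh.1 hsh.2 with hdot | hf
          · exact Or.inr ⟨i - 1, by omega, hdot, by
              have : i - 1 + 1 = i := by omega
              rw [this]; exact hrun i (by omega) hij⟩
          · rcases H3.mp hf with h | ⟨t, ht, hp⟩
            · exact Or.inl h
            · exact Or.inr ⟨t, by omega, hp⟩
        · intro _ _
          right; rfl
        · intro _ hrd
          exfalso
          have := hrun j hij (Nat.le_refl j)
          simp only [Nat.add_sub_cancel] at hrd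
          rw [this] at hrd; exact absurd hrd (by decide)
      · rw [if_neg hsh]
        apply scanB_inv r f0 cur f (j + 1)
        · omega
        · exact H1
        · intro m hm; exact H2 m (by omega)
        · rw [H3]
          constructor
          · rintro (h | ⟨t, ht, hp⟩)
            · exact Or.inl h
            · exact Or.inr ⟨t, by omega, hp⟩
          · rintro (h | ⟨t, ht, hp⟩)
            · exact Or.inl h
            · refine Or.inr ⟨t, ?_, hp⟩
              by_contra hge
              have htj : t + 1 ≤ j := by omega
              have hti : i ≤ t + 1 := by omega
              rcases Nat.eq_or_lt_of_le hti with heq | hlt3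
              · -- t + 1 = i, so t = i - 1 and r.getD (i-1) = "."
                have hi0 : 0 < i := by omega
                have htv : t = i - 1 := by omega
                have : cur.getD (i - 1) "" = "." := H5 hi0 (by rw [← htv]; exact hp.1)
                exact hsh ⟨hi0, this⟩
              · -- i ≤ t ≤ j - 1 : r.getD t = "O" contradicts pair
                obtain ⟨hp1, hp2⟩ := hp
                rw [hrun t (by omega) (by omega)] at hp1
                exact absurd hp1 (by decide)
        · intro _ hdot
          exfalso
          simp only [Nat.add_sub_cancel] at hdot
          rw [pvRunEnd_O cur i hO j hij (Nat.le_refl j)] at hdot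
          exact absurd hdot (by decide)
        · intro _ hrd
          exfalso
          simp only [Nat.add_sub_cancel] at hrd
          rw [hrun j hij (Nat.le_refl j)] at hrd
          exact absurd hrd (by decide)
    · rw [if_neg hO]
      apply scanB_inv r f0 cur f (i + 1)
      · omega
      · exact H1
      · intro m hm; exact H2 m (by omega)
      · rw [H3]
        constructor
        · rintro (h | ⟨t, ht, hp⟩)
          · exact Or.inl h
          · exact Or.inr ⟨t, by omega, hp⟩
        · rintro (h | ⟨t, ht, hp⟩)
          · exact Or.inl h
          · refine Or.inr ⟨t, ?_, hp⟩
            by_contra hge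
            obtain ⟨hp1, hp2⟩ := hp
            have hti : t + 1 = i := by omega
            rw [hti, ← H2 i (Nat.le_refl i)] at hp2
            exact hO hp2
      · intro _ hdot
        simp only [Nat.add_sub_cancel] at hdot ⊢
        rw [H2 i (Nat.le_refl i)] at hdot
        exact Or.inl hdot
      · intro _ hrd
        simp only [Nat.add_sub_cancel] at hrd ⊢
        rw [H2 i (Nat.le_refl i)]
        exact hrd
termination_by r.length - i
decreasing_by
  · have := pvRunEnd_ge cur i; omega
  · have := pvRunEnd_ge cur i; omega
  · omega

theorem rowB_spec (r : List String) (f : Bool) :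
    ((pvScanRow r f 0).2 = true ↔ (f = true ∨ HP r)) := by
  exact scanB_inv r f r f 0 (Nat.zero_le _) rfl (fun _ _ => rfl)
    (by simp) (by omega) (by omega)

-- A-side invariant over the first k steps of the index loop
theorem rowA_inv (r : List String) (f0 : Bool) (k : Nat) (hk : k ≤ r.length - 1) :
    (((List.range k).foldl pvStepAN (r, f0)).1.length = r.length) ∧
    (∀ m, k + 1 ≤ m →
      ((List.range k).foldl pvStepAN (r, f0)).1.getD m "" = r.getD m "") ∧
    (((List.range k).foldl pvStepAN (r, f0)).1.getD k "" = r.getD k "" ∨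
      (((List.range k).foldl pvStepAN (r, f0)).2 = true ∧
       ((List.range k).foldl pvStepAN (r, f0)).1.getD k "" = "." ∧
       r.getD k "" = "O")) ∧
    (((List.range k).foldl pvStepAN (r, f0)).2 = true ↔
      (f0 = true ∨ ∃ t, t < k ∧ PairAt r t)) := by
  induction k with
  | zero => simp
  | succ k ih =>
    have hk' : k ≤ r.length - 1 := by omega
    have hklen : k + 1 < r.length := by omega
    obtain ⟨ih1, ih2, ih3, ih4⟩ := ih hk'
    set st := (List.range k).foldl pvStepAN (r, f0) with hst
    have hfold : (List.range (k + 1)).foldl pvStepAN (r, f0) = pvStepAN st k := by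
      rw [List.range_succ, List.foldl_append]; rfl
    have hget1 : st.1.getD (k + 1) "" = r.getD (k + 1) "" := ih2 (k + 1) (Nat.le_refl _)
    rw [hfold]
    unfold pvStepAN pvStepA
    have hcast : (k : Int) + 1 = ((k + 1 : Nat) : Int) := by push_cast; ring
    rw [hcast]
    simp only [PySem.List.pyGetD_natCast, PySem.List.pySetD_natCast]
    by_cases hc : st.1.getD k "" = "." ∧ st.1.getD (k + 1) "" = "O"
    · rw [if_pos hc]
      have hrO : r.getD (k + 1) "" = "O" := by rw [← hget1]; exact hc.2
      refine ⟨by simp [ih1], ?_, ?_, ?_⟩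
      · intro m hm
        rw [getD_set_ne (by omega), getD_set_ne (by omega)]
        exact ih2 m (by omega)
      · right
        refine ⟨rfl, ?_, hrO⟩
        have hlen : k + 1 < (st.1.set k "O").length := by
          rw [List.length_set, ih1]; omega
        exact getD_set_self hlen "." ""
      · simp only [true_iff]
        rcases ih3 with heq | ⟨hf, _, _⟩
        · exact Or.inr ⟨k, by omega, by rw [← heq]; exact hc.1, hrO⟩
        · rcases ih4.mp hf with h | ⟨t, ht, hp⟩
          · exact Or.inl h
          · exact Or.inr ⟨t, by omega, hp⟩
    · rw [if_neg hc]
      refine ⟨ih1, ?_, Or.inl hget1, ?_⟩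
      · intro m hm; exact ih2 m (by omega)
      · rw [ih4]
        constructor
        · rintro (h | ⟨t, ht, hp⟩)
          · exact Or.inl h
          · exact Or.inr ⟨t, by omega, hp⟩
        · rintro (h | ⟨t, ht, hp⟩)
          · exact Or.inl h
          · refine Or.inr ⟨t, ?_, hp⟩
            by_contra hge
            have htk : t = k := by omega
            subst htk
            apply hc
            refine ⟨?_, by rw [hget1]; exact hp.2⟩
            obtain ⟨hp1, hp2⟩ := hp
            rcases ih3 with heq | ⟨_, _, hrO⟩
            · rw [heq]; exact hp1
            · rw [hrO] at hp1; exact absurd hp1 (by decide)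

theorem rowA_spec (r : List String) (f : Bool) :
    (pvRowA f r = true ↔ (f = true ∨ HP r)) := by
  unfold pvRowA
  rw [PySem.List.pyRange_one]
  have htn : (((r.length : Int) - 1) - 0).toNat = r.length - 1 := by omega
  rw [htn, List.foldl_map]
  have hfn : (fun (st : List String × Bool) (k : Nat) => pvStepA st (0 + (k : Int)))
      = pvStepAN := by
    funext st k
    simp [pvStepAN]
  rw [hfn]
  have h := (rowA_inv r f (r.length - 1) (Nat.le_refl _)).2.2.2
  rw [h]
  unfold HP
  constructor
  · rintro (h | ⟨t, ht, hp⟩)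
    · exact Or.inl h
    · exact Or.inr ⟨t, by omega, hp⟩
  · rintro (h | ⟨t, ht, hp⟩)
    · exact Or.inl h
    · exact Or.inr ⟨t, by omega, hp⟩

theorem foldA_spec (rows : List (List String)) : ∀ f : Bool,
    (rows.foldl pvRowA f = true ↔ (f = true ∨ ∃ row ∈ rows, HP row)) := by
  induction rows with
  | nil => simp
  | cons r t ih =>
    intro f
    simp only [List.foldl_cons, ih (pvRowA f r), rowA_spec r f, List.mem_cons]
    constructor
    · rintro ((h | h) | ⟨row, hm, hp⟩)
      · exact Or.inl h
      · exact Or.inr ⟨r, Or.inl rfl, h⟩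
      · exact Or.inr ⟨row, Or.inr hm, hp⟩
    · rintro (h | ⟨row, (rfl | hm), hp⟩)
      · exact Or.inl (Or.inl h)
      · exact Or.inl (Or.inr hp)
      · exact Or.inr ⟨row, hm, hp⟩

theorem foldB_spec (rows : List (List String)) : ∀ f : Bool,
    (rows.foldl (fun rolled row => (pvScanRow row rolled 0).2) f = true ↔
      (f = true ∨ ∃ row ∈ rows, HP row)) := by
  induction rows with
  | nil => simp
  | cons r t ih =>
    intro f
    simp only [List.foldl_cons, ih, rowB_spec r f, List.mem_cons]
    constructor
    · rintro ((h | h) | ⟨row, hm, hp⟩)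
      · exact Or.inl h
      · exact Or.inr ⟨r, Or.inl rfl, h⟩
      · exact Or.inr ⟨row, Or.inr hm, hp⟩
    · rintro (h | ⟨row, (rfl | hm), hp⟩)
      · exact Or.inl (Or.inl h)
      · exact Or.inl (Or.inr hp)
      · exact Or.inr ⟨row, hm, hp⟩

-- ===== VERDICT (by name: the statement is the Claim_ definition above) =====
theorem roll_rocks_west_spec : Claim_equal_roll_rocks_west := by
  intro rows _
  unfold Spec_roll_rocks_west roll_rocks_west roll_rocks_west_alt
  rw [Bool.eq_iff_iff, foldA_spec rows false, foldB_spec rows false]
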